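-- pv_equiv track=rewrite | github.com/ashwinrachhavt/alfred | apps/alfred/services/interview_service.py | _pick_question_type
-- ===== SOURCE A (Python) =====
-- def _pick_question_type(categories: list[str]) -> str:
--     cats = {c.strip().lower() for c in categories if c}
--     if "coding" in cats:
--         return "coding"
--     if "system_design" in cats:
--         return "system_design"
--     if "behavioral" in cats:
--         return "behavioral"
--     if "ml_ai" in cats:
--         return "coding"
--     return "general"
-- ===== SOURCE B (Python) =====
-- _RANK = {"coding": 0, "system_design": 1, "behavioral": 2, "ml_ai": 3}
-- _RESULT = {0: "coding", 1: "system_design", 2: "behavioral", 3: "coding"}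
--
-- def _pick_question_type(categories: list[str]) -> str:
--     # Single pass: track the minimum priority rank seen; no set, no membership tests.
--     best = 4
--     for c in categories:
--         if c:
--             best = min(best, _RANK.get(c.strip().lower(), 4))
--     return _RESULT.get(best, "general")
-- ===== Notes on version B (the rewrite author's own statement) =====
-- stated objective: alternative
-- what changed: Replaces A's build-a-set-then-test-four-keys cascade with a single accumulator pass that maps each category to a numeric priority rank, keeps the running minimum, and decodes the best rank to the result at the end.
import Mathlib
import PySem

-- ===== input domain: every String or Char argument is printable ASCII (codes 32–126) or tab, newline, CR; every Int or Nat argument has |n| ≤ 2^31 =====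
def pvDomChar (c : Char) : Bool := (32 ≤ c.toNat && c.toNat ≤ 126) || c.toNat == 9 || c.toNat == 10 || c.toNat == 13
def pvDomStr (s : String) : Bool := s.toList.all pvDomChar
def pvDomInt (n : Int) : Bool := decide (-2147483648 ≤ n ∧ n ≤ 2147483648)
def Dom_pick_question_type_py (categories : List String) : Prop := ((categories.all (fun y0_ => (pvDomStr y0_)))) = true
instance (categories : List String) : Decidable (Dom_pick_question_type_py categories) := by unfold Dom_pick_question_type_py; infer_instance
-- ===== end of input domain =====

-- B replaces A's build-a-set-then-test-four-keys cascade with a single min-rank accumulator pass (alternative, same cost).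

-- ===== PORT A =====
def pick_question_type_py (categories : List String) : String :=
  let cats : PySem.Set String :=
    PySem.Set.ofList ((categories.filter (fun c => c ≠ "")).map
      (fun c => PySem.Str.lower (PySem.Str.strip c)))
  if PySem.Set.contains cats "coding" then "coding"
  else if PySem.Set.contains cats "system_design" then "system_design"
  else if PySem.Set.contains cats "behavioral" then "behavioral"
  else if PySem.Set.contains cats "ml_ai" then "coding"
  else "general"

-- ===== PORT B =====
def pvRankDict : PySem.Dict String Int :=
  PySem.Dict.ofList [("coding", 0), ("system_design", 1), ("behavioral", 2), ("ml_ai", 3)]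

def pvResultDict : PySem.Dict Int String :=
  PySem.Dict.ofList [(0, "coding"), (1, "system_design"), (2, "behavioral"), (3, "coding")]

def pick_question_type_py_alt (categories : List String) : String :=
  let best : Int := categories.foldl
    (fun best c =>
      if c ≠ "" then
        min best (PySem.Dict.getD pvRankDict (PySem.Str.lower (PySem.Str.strip c)) 4)
      else best) 4
  PySem.Dict.getD pvResultDict best "general"

-- ===== PRECONDITION & SPEC =====
def Spec_pick_question_type_py (categories : List String) (out : String) : Prop := out = pick_question_type_py_alt categories
instance (categories : List String) (out : String) : Decidable (Spec_pick_question_type_py categories out) := by unfold Spec_pick_question_type_py; infer_instance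

-- ===== CLAIM (what is proved, stated in full; the proofs are below) =====
def Claim_equal_pick_question_type_py : Prop := ∀ (categories : List String), Dom_pick_question_type_py categories → Spec_pick_question_type_py categories (pick_question_type_py categories)

-- ===== LEMMAS AND PROOFS =====

-- rank of one normalized string, as B computes it
def pvRank (s : String) : Int := PySem.Dict.getD pvRankDict s 4

theorem pvRank_eq (s : String) :
    pvRank s = if s = "coding" then 0 else if s = "system_design" then 1
      else if s = "behavioral" then 2 else if s = "ml_ai" then 3 else 4 := by
  unfold pvRank pvRankDict
  split_ifs with h1 h2 h3 h4
  · subst h1; rfl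
  · subst h2; rfl
  · subst h3; rfl
  · subst h4; rfl
  · simp [PySem.Dict.ofList, PySem.Dict.update, List.foldl, PySem.Dict.getD_insert,
      PySem.Dict.getD_empty, h1, h2, h3, h4]

theorem pvRank_le (s : String) : pvRank s ≤ 4 := by
  rw [pvRank_eq]; split_ifs <;> omega

theorem pvRank_nonneg (s : String) : 0 ≤ pvRank s := by
  rw [pvRank_eq]; split_ifs <;> omega

-- B's guarded fold over the raw list equals the min-fold over the normalized list
theorem pv_fold_norm (categories : List String) (init : Int) :
    categories.foldl
      (fun best c =>
        if c ≠ "" then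
          min best (PySem.Dict.getD pvRankDict (PySem.Str.lower (PySem.Str.strip c)) 4)
        else best) init
    = ((categories.filter (fun c => c ≠ "")).map
        (fun c => PySem.Str.lower (PySem.Str.strip c))).foldl
        (fun best s => min best (pvRank s)) init := by
  induction categories generalizing init with
  | nil => rfl
  | cons c t ih =>
      by_cases hc : c = ""
      · simpa [hc] using ih init
      · simpa [hc, pvRank] using
          ih (min init (PySem.Dict.getD pvRankDict (PySem.Str.lower (PySem.Str.strip c)) 4))

-- pulling the initial accumulator out of the min-fold
theorem pv_fold_min (l : List String) (init : Int) (hinit : init ≤ 4) :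
    l.foldl (fun best s => min best (pvRank s)) init
      = min init (l.foldl (fun best s => min best (pvRank s)) 4) := by
  induction l generalizing init with
  | nil => simp; omega
  | cons s t ih =>
      have hs := pvRank_le s
      simp only [List.foldl_cons]
      rw [ih (min init (pvRank s)) (by omega), ih (min 4 (pvRank s)) (by omega)]
      omega

-- the min-fold computes the cascade over membership
theorem pv_fold_cascade (l : List String) :
    l.foldl (fun best s => min best (pvRank s)) 4
      = if l.contains "coding" then 0 else if l.contains "system_design" then 1
        else if l.contains "behavioral" then 2 else if l.contains "ml_ai" then 3 else 4 := by
  induction l with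
  | nil => rfl
  | cons s t ih =>
      have hs4 := pvRank_le s
      have hs0 := pvRank_nonneg s
      simp only [List.foldl_cons]
      rw [pv_fold_min t (min 4 (pvRank s)) (by have := pvRank_le s; omega), ih, pvRank_eq]
      simp only [List.contains_cons]
      by_cases h1 : s = "coding" <;> by_cases h2 : s = "system_design" <;>
        by_cases h3 : s = "behavioral" <;> by_cases h4 : s = "ml_ai" <;>
          simp [h1, h2, h3, h4] <;> split_ifs <;> first | omega | tauto

-- membership in the Python set equals membership in the underlying normalized list
theorem pv_contains_ofList (xs : List String) (x : String) :
    PySem.Set.contains (PySem.Set.ofList xs) x = xs.contains x := by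
  by_cases h : x ∈ xs <;>
    simp [PySem.Set.contains_eq_listContains, PySem.Set.mem_ofList, h]

-- ===== VERDICT (by name: the statement is the Claim_ definition above) =====
theorem pick_question_type_py_spec : Claim_equal_pick_question_type_py := by
  intro categories _
  unfold Spec_pick_question_type_py pick_question_type_py pick_question_type_py_alt
  simp only [pv_contains_ofList, pv_fold_norm, pv_fold_cascade]
  set l := (categories.filter (fun c => c ≠ "")).map (fun c => PySem.Str.lower (PySem.Str.strip c))
  cases hc : l.contains "coding" <;> cases hs : l.contains "system_design" <;>
    cases hb : l.contains "behavioral" <;> cases hm : l.contains "ml_ai" <;>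
    simp [hc, hs, hb, hm, pvResultDict, PySem.Dict.ofList] <;> decide
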